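-- pv_equiv track=rewrite | github.com/jonasberge/challenges | codewars/4-kyu/next-biggest-number-with-the-same-digits.py | next_largest_index
-- ===== SOURCE A (Python) =====
-- def next_largest_index(n, digits):
--     index, low = None, 10
--     for i, d in enumerate(digits):
--         if d > n and d < low:
--             index, low = i, d
--     if index is None:
--         raise ValueError('no digit is greater than n')
--     return index
-- ===== SOURCE B (Python) =====
-- def next_largest_index(n, digits):
--     cands = {d for d in digits if d > n}
--     if not cands:
--         raise ValueError('no digit is greater than n')
--     return digits.index(min(cands))
-- ===== Notes on version B (the rewrite author's own statement) =====
-- stated objective: simpler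
-- what changed: B abandons A's index-tracking running-minimum scan entirely: it works in value space, building the set of digit values greater than n, taking min of that set, and then locating that value's first position with digits.index; A's hard-coded bound 10 disappears.
import Mathlib
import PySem

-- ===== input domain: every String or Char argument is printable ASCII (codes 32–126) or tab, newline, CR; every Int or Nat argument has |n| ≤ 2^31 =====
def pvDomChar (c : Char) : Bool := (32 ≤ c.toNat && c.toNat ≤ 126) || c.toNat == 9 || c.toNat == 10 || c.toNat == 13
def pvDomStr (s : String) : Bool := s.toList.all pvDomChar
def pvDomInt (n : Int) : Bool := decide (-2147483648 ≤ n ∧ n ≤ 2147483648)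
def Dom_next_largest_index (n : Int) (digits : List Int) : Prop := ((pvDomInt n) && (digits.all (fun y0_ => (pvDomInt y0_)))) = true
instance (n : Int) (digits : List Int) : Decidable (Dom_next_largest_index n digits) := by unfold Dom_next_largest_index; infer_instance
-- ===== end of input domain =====

-- B replaces A's index-tracking running-minimum scan by value-space work: the set of
-- qualifying values, its min, and a positional lookup with digits.index; objective: simpler.

-- ===== PORT A =====
def next_largest_index (n : Int) (digits : List Int) : Int :=
  let st := (PySem.List.enumerate digits).foldl
    (fun (s : Option Int × Int) (p : Int × Int) =>
      if p.2 > n ∧ p.2 < s.2 then (some p.1, p.2) else s)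
    (none, 10)
  st.1.getD 0  -- Python A raises ValueError when st.1 = none; excluded by Pre_

-- ===== PORT B =====
def next_largest_index_alt (n : Int) (digits : List Int) : Int :=
  let cands : PySem.Set Int := PySem.Set.ofList (digits.filter (fun d => decide (d > n)))
  match PySem.List.min? cands (fun d => d) with
  | none => 0  -- Python B raises ValueError when cands is empty; excluded by Pre_
  | some m =>
      match PySem.List.index? digits m with
      | some k => (k : Int)
      | none => 0  -- unreachable: m ∈ digits

-- ===== PRECONDITION & SPEC =====
-- Pre_ is exactly the set of inputs on which Python A returns normally; elsewhere A
-- raises ValueError (its running minimum starts at 10, so only digits d with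
-- n < d < 10 are ever recorded).
def Pre_next_largest_index (n : Int) (digits : List Int) : Prop :=
  ∃ d ∈ digits, n < d ∧ d < 10
instance (n : Int) (digits : List Int) : Decidable (Pre_next_largest_index n digits) := by
  unfold Pre_next_largest_index; infer_instance
def pvWitness_next_largest_index : Int × List Int := (3, [1, 5, 9])

def Spec_next_largest_index (n : Int) (digits : List Int) (out : Int) : Prop := out = next_largest_index_alt n digits
instance (n : Int) (digits : List Int) (out : Int) : Decidable (Spec_next_largest_index n digits out) := by unfold Spec_next_largest_index; infer_instance

-- ===== CLAIM (what is proved, stated in full; the proofs are below) =====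
def Claim_equal_next_largest_index : Prop := ∀ (n : Int) (digits : List Int), Dom_next_largest_index n digits → Pre_next_largest_index n digits → Spec_next_largest_index n digits (next_largest_index n digits)

-- ===== LEMMAS AND PROOFS =====

-- A's loop body.
def stepA (n : Int) (s : Option Int × Int) (p : Int × Int) : Option Int × Int :=
  if p.2 > n ∧ p.2 < s.2 then (some p.1, p.2) else s

-- minimum value of a list (proof helper)
def minQ : List Int → Option Int
  | [] => none
  | x :: xs => some (match minQ xs with | none => x | some m => min x m)

theorem minQ_eq_none_iff (l : List Int) : minQ l = none ↔ l = [] := by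
  cases l <;> simp [minQ]

theorem minQ_mem {l : List Int} {m : Int} (h : minQ l = some m) : m ∈ l := by
  induction l generalizing m with
  | nil => cases h
  | cons x xs ih =>
    simp only [minQ] at h
    cases hx : minQ xs with
    | none =>
      rw [hx] at h
      have : x = m := by simpa using h
      subst this; simp
    | some m' =>
      rw [hx] at h
      have : min x m' = m := by simpa using h
      subst this
      rcases min_choice x m' with hc | hc <;> rw [hc]
      · simp
      · exact List.mem_cons_of_mem _ (ih hx)

theorem minQ_isMin {l : List Int} {m : Int} (h : minQ l = some m) : ∀ x ∈ l, m ≤ x := by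
  induction l generalizing m with
  | nil => cases h
  | cons x xs ih =>
    simp only [minQ] at h
    intro y hy
    rcases List.mem_cons.mp hy with hxy | hmem
    · cases hx : minQ xs with
      | none =>
        rw [hx] at h
        have hx2 : x = m := by simpa using h
        rw [hxy, ← hx2]
      | some m' =>
        rw [hx] at h
        have hx2 : min x m' = m := by simpa using h
        rw [hxy, ← hx2]
        exact min_le_left _ _
    · cases hx : minQ xs with
      | none =>
        rw [minQ_eq_none_iff] at hx; subst hx; cases hmem
      | some m' =>
        rw [hx] at h
        have : min x m' = m := by simpa using h
        subst this
        exact le_trans (min_le_right _ _) (ih hx y hmem)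

-- Characterization of A's scan: its final state is determined by the minimum of the
-- qualifying values (n < d < low) and that value's first position.
theorem foldA_spec (n : Int) (xs : List Int) : ∀ (s : Int) (oi : Option Int) (low : Int),
    (PySem.List.enumerate xs s).foldl (stepA n) (oi, low) =
      match minQ (xs.filter (fun d => decide (n < d) && decide (d < low))) with
      | none => (oi, low)
      | some m => (some (s + (((PySem.List.index? xs m).getD 0 : Nat) : Int)), m) := by
  induction xs with
  | nil => intro s oi low; simp [PySem.List.enumerate_nil, minQ]
  | cons x xs ih =>
    intro s oi low
    rw [PySem.List.enumerate_cons]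
    simp only [List.foldl_cons]
    by_cases hq : n < x ∧ x < low
    · have hstep : stepA n (oi, low) (s, x) = (some s, x) := by
        simp [stepA, hq.1, hq.2]
      rw [hstep, ih (s + 1) (some s) x]
      have hfq : (x :: xs).filter (fun d => decide (n < d) && decide (d < low)) =
          x :: xs.filter (fun d => decide (n < d) && decide (d < low)) := by
        simp [hq.1, hq.2]
      rw [hfq]
      cases hx : minQ (xs.filter (fun d => decide (n < d) && decide (d < x))) with
      | none =>
        -- no qualifier below x in xs: x is the overall minimum
        have hge : ∀ y ∈ xs.filter (fun d => decide (n < d) && decide (d < low)), x ≤ y := by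
          intro y hy
          simp only [List.mem_filter, decide_eq_true_eq, Bool.and_eq_true] at hy
          by_contra hlt
          have : y ∈ xs.filter (fun d => decide (n < d) && decide (d < x)) := by
            simp only [List.mem_filter, decide_eq_true_eq, Bool.and_eq_true]
            exact ⟨hy.1, hy.2.1, by omega⟩
          rw [minQ_eq_none_iff] at hx
          rw [hx] at this; cases this
        have hmz : (match minQ (xs.filter (fun d => decide (n < d) && decide (d < low))) with
            | none => x | some m2 => min x m2) = x := by
          cases hm2 : minQ (xs.filter (fun d => decide (n < d) && decide (d < low))) with
          | none => rfl
          | some m2 => simp [min_eq_left (hge m2 (minQ_mem hm2))]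
        simp only [minQ, hmz, PySem.List.index?_cons_self, Option.getD_some]
        norm_num
      | some m' =>
        have hm'x : m' < x := by
          have := minQ_mem hx
          simp only [List.mem_filter, decide_eq_true_eq, Bool.and_eq_true] at this
          exact this.2.2
        have hm'mem : m' ∈ xs ∧ n < m' ∧ m' < x := by
          have := minQ_mem hx
          simp only [List.mem_filter, decide_eq_true_eq, Bool.and_eq_true] at this
          exact this
        -- the minimum over the wider filter equals m'
        have hm2 : minQ (xs.filter (fun d => decide (n < d) && decide (d < low))) = some m' := by
          cases hm2 : minQ (xs.filter (fun d => decide (n < d) && decide (d < low))) with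
          | none =>
            rw [minQ_eq_none_iff] at hm2
            have : m' ∈ xs.filter (fun d => decide (n < d) && decide (d < low)) := by
              simp only [List.mem_filter, decide_eq_true_eq, Bool.and_eq_true]
              exact ⟨hm'mem.1, hm'mem.2.1, by omega⟩
            rw [hm2] at this; cases this
          | some m2 =>
            have h1 : m2 ≤ m' := by
              apply minQ_isMin hm2
              simp only [List.mem_filter, decide_eq_true_eq, Bool.and_eq_true]
              exact ⟨hm'mem.1, hm'mem.2.1, by omega⟩
            have hmem2 := minQ_mem hm2
            simp only [List.mem_filter, decide_eq_true_eq, Bool.and_eq_true] at hmem2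
            have h2 : m' ≤ m2 := by
              by_cases h2x : m2 < x
              · apply minQ_isMin hx
                simp only [List.mem_filter, decide_eq_true_eq, Bool.and_eq_true]
                exact ⟨hmem2.1, hmem2.2.1, by omega⟩
              · omega
            rw [le_antisymm h1 h2]
        have hmin : (match minQ (xs.filter (fun d => decide (n < d) && decide (d < low))) with
            | none => x | some m2 => min x m2) = m' := by
          rw [hm2]; simp [min_eq_right (le_of_lt hm'x)]
        have hcons := PySem.List.index?_cons_of_ne xs (show x ≠ m' by omega)
        obtain ⟨k, hidx⟩ : ∃ k, PySem.List.index? xs m' = some k := by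
          cases hE : PySem.List.index? xs m' with
          | none => rw [PySem.List.index?_eq_none_iff] at hE; exact absurd hm'mem.1 hE
          | some k => exact ⟨k, rfl⟩
        simp only [minQ, hmin, hcons, hidx, Option.map_some, Option.getD_some]
        rw [Prod.mk.injEq]
        refine ⟨?_, rfl⟩
        congr 1
        push_cast
        ring
    · have hstep : stepA n (oi, low) (s, x) = (oi, low) := by
        simp only [stepA]
        rw [if_neg]
        intro ⟨h1, h2⟩; exact hq ⟨h1, h2⟩
      rw [hstep, ih (s + 1) oi low]
      have hfq : (x :: xs).filter (fun d => decide (n < d) && decide (d < low)) =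
          xs.filter (fun d => decide (n < d) && decide (d < low)) := by
        rw [List.filter_cons, if_neg]
        simp only [decide_eq_true_eq, Bool.and_eq_true]
        intro ⟨h1, h2⟩; exact hq ⟨h1, h2⟩
      rw [hfq]
      cases hm : minQ (xs.filter (fun d => decide (n < d) && decide (d < low))) with
      | none => rfl
      | some m =>
        have hmm := minQ_mem hm
        simp only [List.mem_filter, decide_eq_true_eq, Bool.and_eq_true] at hmm
        have hxm : x ≠ m := by intro h; subst h; exact hq ⟨hmm.2.1, hmm.2.2⟩
        have hcons := PySem.List.index?_cons_of_ne xs hxm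
        obtain ⟨k, hidx⟩ : ∃ k, PySem.List.index? xs m = some k := by
          cases hE : PySem.List.index? xs m with
          | none => rw [PySem.List.index?_eq_none_iff] at hE; exact absurd hmm.1 hE
          | some k => exact ⟨k, rfl⟩
        simp only [hcons, hidx, Option.map_some, Option.getD_some]
        rw [Prod.mk.injEq]
        refine ⟨?_, rfl⟩
        congr 1
        push_cast
        ring

-- ===== VERDICT (by name: the statement is the Claim_ definition above) =====
theorem next_largest_index_spec : Claim_equal_next_largest_index := by
  intro n digits _ hpre
  unfold Spec_next_largest_index
  obtain ⟨d, hd, hnd, hd10⟩ := hpre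
  have hA : next_largest_index n digits =
      ((PySem.List.enumerate digits 0).foldl (stepA n) (none, 10)).1.getD 0 := rfl
  rw [hA, foldA_spec n digits 0 none 10]
  have hdF : d ∈ digits.filter (fun d => decide (n < d) && decide (d < 10)) := by
    simp only [List.mem_filter, decide_eq_true_eq, Bool.and_eq_true]
    exact ⟨hd, hnd, hd10⟩
  obtain ⟨m, hm⟩ : ∃ m, minQ (digits.filter (fun d => decide (n < d) && decide (d < 10))) = some m := by
    cases hmE : minQ (digits.filter (fun d => decide (n < d) && decide (d < 10))) with
    | none => rw [minQ_eq_none_iff] at hmE; rw [hmE] at hdF; cases hdF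
    | some m => exact ⟨m, rfl⟩
  have hmm := minQ_mem hm
  simp only [List.mem_filter, decide_eq_true_eq, Bool.and_eq_true] at hmm
  obtain ⟨hmdig, hnm, hm10⟩ := hmm
  have hmB : m ∈ PySem.Set.ofList (digits.filter (fun d => decide (d > n))) := by
    rw [PySem.Set.mem_ofList]
    simp only [List.mem_filter, gt_iff_lt, decide_eq_true_eq]
    exact ⟨hmdig, hnm⟩
  obtain ⟨m', hmin⟩ : ∃ m', PySem.List.min? (PySem.Set.ofList (digits.filter (fun d => decide (d > n)))) (fun d => d) = some m' := by
    cases hE : PySem.List.min? (PySem.Set.ofList (digits.filter (fun d => decide (d > n)))) (fun d => d) with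
    | none => rw [PySem.List.min?_eq_none_iff] at hE; rw [hE] at hmB; cases hmB
    | some m' => exact ⟨m', rfl⟩
  have hm'mem := PySem.List.min?_mem hmin
  rw [PySem.Set.mem_ofList] at hm'mem
  simp only [List.mem_filter, gt_iff_lt, decide_eq_true_eq] at hm'mem
  have h1 : m' ≤ m := PySem.List.min?_isMin hmin m hmB
  have h2 : m ≤ m' := by
    by_cases h10 : m' < 10
    · apply minQ_isMin hm
      simp only [List.mem_filter, decide_eq_true_eq, Bool.and_eq_true]
      exact ⟨hm'mem.1, hm'mem.2, h10⟩
    · omega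
  have hmm' : m' = m := le_antisymm h1 h2
  obtain ⟨k, hidx⟩ : ∃ k, PySem.List.index? digits m = some k := by
    cases hE : PySem.List.index? digits m with
    | none => rw [PySem.List.index?_eq_none_iff] at hE; exact absurd hmdig hE
    | some k => exact ⟨k, rfl⟩
  simp only [next_largest_index_alt, hm, hmin, hmm', hidx, Option.getD_some]
  omega
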